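-- pv_equiv track=rewrite | github.com/nokvag/deobfuscate-solobot | old/level7+_not_trusted/final_decoder_improved_v2.py | replace_obfuscated_strings
-- ===== SOURCE A (Python) =====
-- def replace_obfuscated_strings(code: str) -> str:
--     """Заменяет все оставшиеся обфусцированные строки на их предполагаемые значения"""
--     # Основные замены для обфусцированных строк
--     str_replacements = {
--         "'web_server_2'": "'asyncio'",
--         "'utf-8'": "'asyncio'",
--         '"web_server_2"': '"asyncio"',
--         '"utf-8"': '"utf-8"',  # Оставляем как есть, если это действительно utf-8
--     }
--
--     for old, new in str_replacements.items():
--         code = code.replace(old, new)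
--
--     return code
-- ===== SOURCE B (Python) =====
-- REPLACEMENTS = {
--     "'web_server_2'": "'asyncio'",
--     "'utf-8'": "'asyncio'",
--     '"web_server_2"': '"asyncio"',
-- }
--
--
-- def replace_obfuscated_strings(code: str) -> str:
--     """Rewrite the obfuscated string literals in one left-to-right scan."""
--     out = []
--     i = 0
--     n = len(code)
--     while i < n:
--         for old, new in REPLACEMENTS.items():
--             if code.startswith(old, i):
--                 out.append(new)
--                 i += len(old)
--                 break
--         else:
--             out.append(code[i])
--             i += 1
--     return "".join(out)
-- ===== Notes on version B (the rewrite author's own statement) =====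
-- stated objective: alternative
-- what changed: A makes four whole-string str.replace passes (one per table entry, one an identity); B makes a single left-to-right scan that consults the replacement table at each position and emits either a replacement or the current character. Pre_ excludes inputs where occurrences of the two single-quoted obfuscated literals overlap on a shared quote, on which A's later pass re-matches text produced by an earlier pass (cascading) while B rewrites only text present in the input; both behaviours are defensible on such overlapping literals.
-- outside the precondition, e.g. on replace_obfuscated_strings("'utf-8'web_server_2'"): A returns "'asyncio'asyncio'", B returns "'asyncio'web_server_2'"
import Mathlib
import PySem

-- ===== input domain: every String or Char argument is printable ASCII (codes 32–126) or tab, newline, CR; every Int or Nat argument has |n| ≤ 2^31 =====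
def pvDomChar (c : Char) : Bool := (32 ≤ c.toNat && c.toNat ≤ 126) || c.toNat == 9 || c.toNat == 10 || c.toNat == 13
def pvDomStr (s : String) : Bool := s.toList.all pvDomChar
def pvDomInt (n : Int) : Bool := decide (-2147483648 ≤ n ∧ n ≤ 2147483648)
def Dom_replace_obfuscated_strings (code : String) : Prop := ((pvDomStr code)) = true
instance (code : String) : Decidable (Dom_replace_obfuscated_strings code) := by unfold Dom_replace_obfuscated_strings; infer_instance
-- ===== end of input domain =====

-- B replaces A's four sequential whole-string replace passes by a single left-to-right scan with a
-- replacement table (alternative decomposition, same cost); Pre_ excludes inputs whose obfuscated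
-- literals overlap, where A's sequential passes cascade into rewriting text not present in the input.


-- ===== PORT A =====
-- literal port of A: build the dict, then fold its items with str.replace
def replace_obfuscated_strings (code : String) : String :=
  let str_replacements : PySem.Dict String String :=
    ((((PySem.Dict.empty).insert "'web_server_2'" "'asyncio'").insert "'utf-8'" "'asyncio'").insert
        "\"web_server_2\"" "\"asyncio\"").insert "\"utf-8\"" "\"utf-8\""
  str_replacements.items.foldl (fun code p => PySem.Str.replace code p.1 p.2) code

-- ===== PORT B =====
-- Source B's REPLACEMENTS table, as (key, value) character lists
def pvK1 : List Char := ['\'', 'w', 'e', 'b', '_', 's', 'e', 'r', 'v', 'e', 'r', '_', '2', '\'']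
def pvV1 : List Char := ['\'', 'a', 's', 'y', 'n', 'c', 'i', 'o', '\'']
def pvK2 : List Char := ['\'', 'u', 't', 'f', '-', '8', '\'']
def pvK3 : List Char := ['"', 'w', 'e', 'b', '_', 's', 'e', 'r', 'v', 'e', 'r', '_', '2', '"']
def pvV3 : List Char := ['"', 'a', 's', 'y', 'n', 'c', 'i', 'o', '"']

-- Source B's while loop: at each position try the table entries in order, else copy the character
def pvScan : List Char → List Char
  | [] => []
  | c :: t =>
    if pvK1.isPrefixOf (c :: t) then pvV1 ++ pvScan (t.drop 13)
    else if pvK2.isPrefixOf (c :: t) then pvV1 ++ pvScan (t.drop 6)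
    else if pvK3.isPrefixOf (c :: t) then pvV3 ++ pvScan (t.drop 13)
    else c :: pvScan t
  termination_by l => l.length
  decreasing_by all_goals (simp; try omega)

def replace_obfuscated_strings_alt (code : String) : String :=
  String.ofList (pvScan code.toList)

-- ===== PRECONDITION & SPEC =====
def pvBad1 : List Char :=
  ['\'', 'w', 'e', 'b', '_', 's', 'e', 'r', 'v', 'e', 'r', '_', '2', '\'', 'u', 't', 'f', '-', '8', '\'']
def pvBad2 : List Char :=
  ['\'', 'u', 't', 'f', '-', '8', '\'', 'w', 'e', 'b', '_', 's', 'e', 'r', 'v', 'e', 'r', '_', '2', '\'']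

-- Pre_ excludes the inputs containing "'web_server_2'utf-8'" or "'utf-8'web_server_2'", i.e. those
-- where occurrences of the two single-quoted obfuscated literals overlap on a shared quote: there
-- A's second pass re-matches text produced by its first pass (cascading), a corner on which the
-- sequential-pass and single-scan readings of the table legitimately disagree.
def Pre_replace_obfuscated_strings (code : String) : Prop :=
  ¬ (pvBad1 <:+: code.toList) ∧ ¬ (pvBad2 <:+: code.toList)
instance (code : String) : Decidable (Pre_replace_obfuscated_strings code) := by
  unfold Pre_replace_obfuscated_strings; infer_instance

def pvWitness_replace_obfuscated_strings : String := "f = open(p, encoding='utf-8')"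

def Spec_replace_obfuscated_strings (code : String) (out : String) : Prop := out = replace_obfuscated_strings_alt code
instance (code : String) (out : String) : Decidable (Spec_replace_obfuscated_strings code out) := by unfold Spec_replace_obfuscated_strings; infer_instance

-- ===== CLAIM (what is proved, stated in full; the proofs are below) =====
def Claim_equal_replace_obfuscated_strings : Prop := ∀ (code : String), Dom_replace_obfuscated_strings code → Pre_replace_obfuscated_strings code → Spec_replace_obfuscated_strings code (replace_obfuscated_strings code)

-- ===== LEMMAS AND PROOFS =====

def pvRepl (old new : List Char) : List Char → List Char
  | [] => []
  | c :: t =>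
    if old.isPrefixOf (c :: t) ∧ old ≠ [] then new ++ pvRepl old new (t.drop (old.length - 1))
    else c :: pvRepl old new t
  termination_by l => l.length
  decreasing_by all_goals (simp; try omega)

lemma pvRepl_go (old new : List Char) (ho : old ≠ []) :
    ∀ (fuel : Nat) (l acc : List Char), l.length ≤ fuel →
      PySem.Chars.replace.go old new fuel l acc = acc.reverse ++ pvRepl old new l := by
  intro fuel
  induction fuel with
  | zero =>
    intro l acc h
    have : l = [] := by cases l <;> simp_all
    subst this
    simp [PySem.Chars.replace.go, pvRepl]
  | succ f ih =>
    intro l acc h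
    match l with
    | [] => simp [PySem.Chars.replace.go, pvRepl]
    | c :: t =>
      obtain ⟨o, os, rfl⟩ : ∃ o os, old = o :: os := by cases old <;> simp_all
      by_cases hp : (o :: os).isPrefixOf (c :: t) = true
      · rw [PySem.Chars.replace.go]; simp only [hp, if_true]
        have hlen : (List.drop (o :: os).length (c :: t)).length ≤ f := by
          simp only [List.length_drop, List.length_cons] at *; omega
        rw [ih _ _ hlen]
        rw [pvRepl]
        simp [hp]
      · rw [PySem.Chars.replace.go]; simp only [hp]
        have hlen : t.length ≤ f := by simp at h; omega
        rw [ih _ _ hlen]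
        rw [pvRepl]
        simp [hp]

lemma str_replace_eq (s old new : String) (ho : old.toList ≠ []) :
    (PySem.Str.replace s old new).toList = pvRepl old.toList new.toList s.toList := by
  rw [PySem.Str.toList_replace]
  rw [PySem.Chars.replace]
  have : old.toList.isEmpty = false := by cases h : old.toList <;> simp_all
  rw [this]
  simp only [Bool.false_eq_true, if_false]
  rw [pvRepl_go _ _ ho _ _ _ le_rfl]
  simp

lemma pvRepl_self (old : List Char) (ho : old ≠ []) :
    ∀ l, pvRepl old old l = l := by
  intro l
  induction l using pvRepl.induct old with
  | case1 => simp [pvRepl]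
  | case2 c t h ih =>
    rw [pvRepl]
    simp only [h]
    obtain ⟨r, hr⟩ := List.isPrefixOf_iff_prefix.mp h.1
    obtain ⟨o, os, rfl⟩ : ∃ o os, old = o :: os := by cases old <;> simp_all
    obtain ⟨rfl, hr2⟩ : o = c ∧ os ++ r = t := by simpa using hr
    subst hr2
    simp only [List.length_cons, Nat.add_sub_cancel, List.drop_left] at ih ⊢
    rw [ih]
    simp [ho]
  | case3 c t h ih =>
    rw [pvRepl]
    simp only [h, if_false]
    rw [ih]

lemma pvRepl_skip (old new : List Char) :
    ∀ (v X : List Char), (∀ i, i < v.length → ¬ old.isPrefixOf (v.drop i ++ X) = true) →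
      pvRepl old new (v ++ X) = v ++ pvRepl old new X := by
  intro v
  induction v with
  | nil => intro X h; simp
  | cons c w ih =>
    intro X h
    have h0 := h 0 (by simp)
    simp only [List.drop_zero] at h0
    rw [List.cons_append, pvRepl]
    have hn : ¬ (old.isPrefixOf (c :: (w ++ X)) = true ∧ old ≠ []) := by
      intro ⟨h1, _⟩; exact h0 (by simpa using h1)
    rw [if_neg hn]
    rw [ih X (fun i hi => by simpa using h (i + 1) (by simpa using hi))]
    simp

lemma pvRepl_pres (old new : List Char) (q : Char) (hq : old.head? = some q)
    (hv : new.head? = some q) :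
    ∀ (p : List Char), (∀ c ∈ p.dropLast, c ≠ q) →
      ∀ X, p.isPrefixOf (pvRepl old new X) = true → p.isPrefixOf X = true := by
  obtain ⟨o, os, rfl⟩ : ∃ o os, old = o :: os := by cases old <;> simp_all
  obtain ⟨m, ns, rfl⟩ : ∃ m ns, new = m :: ns := by cases new <;> simp_all
  simp only [List.head?_cons, Option.some.injEq] at hq hv
  intro p
  induction p with
  | nil => intro _ X _; simp [List.isPrefixOf]
  | cons c ps ih =>
    intro hp X hpre
    match X with
    | [] =>
      rw [pvRepl] at hpre
      simp [List.isPrefixOf] at hpre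
    | d :: t =>
      by_cases hP : (o :: os).isPrefixOf (d :: t) = true ∧ (o :: os : List Char) ≠ []
      · rw [pvRepl, if_pos hP] at hpre
        have hc : c = m := by
          simp only [List.cons_append, List.isPrefixOf_cons₂] at hpre
          exact beq_iff_eq.mp (Bool.and_elim_left hpre)
        have hd : d = o := by
          have := hP.1; simp only [List.isPrefixOf_cons₂] at this
          exact (beq_iff_eq.mp (Bool.and_elim_left this)).symm
        match ps, hp with
        | [], _ =>
          have : c = d := by rw [hc, hv, hd, hq]
          subst this
          simp [List.isPrefixOf]
        | p1 :: ps', hp =>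
          exact absurd (by rw [hc, hv] : c = q) (hp c (by simp))
      · rw [pvRepl, if_neg hP] at hpre
        simp only [List.isPrefixOf_cons₂] at hpre ⊢
        obtain ⟨h1, h2⟩ := Bool.and_eq_true_iff.mp hpre
        refine Bool.and_eq_true_iff.mpr ⟨h1, ?_⟩
        refine ih (fun x hx => hp x ?_) t h2
        cases ps with
        | nil => simp at hx
        | cons a b => simp [List.dropLast_cons₂] at hx ⊢; tauto

def pvPat1 : List Char := ['w', 'e', 'b', '_', 's', 'e', 'r', 'v', 'e', 'r', '_', '2', '\'']

def pvPat2 : List Char := ['u', 't', 'f', '-', '8', '\'']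
def pvPat3 : List Char := ['w', 'e', 'b', '_', 's', 'e', 'r', 'v', 'e', 'r', '_', '2', '"']

lemma pvRepl_head (old new : List Char) (ho : old ≠ []) (X : List Char) :
    pvRepl old new (old ++ X) = new ++ pvRepl old new X := by
  obtain ⟨o, os, rfl⟩ : ∃ o os, old = o :: os := by cases old <;> simp_all
  rw [List.cons_append, pvRepl, if_pos]
  · simp
  · exact ⟨List.isPrefixOf_iff_prefix.mpr ⟨X, by simp⟩, by simp⟩

lemma pvRepl_cons (old new : List Char) (c : Char) (t : List Char)
    (h : ¬ old.isPrefixOf (c :: t) = true) :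
    pvRepl old new (c :: t) = c :: pvRepl old new t := by
  rw [pvRepl, if_neg]; intro ⟨h1, _⟩; exact h h1

lemma pvScan_k1 (r : List Char) : pvScan (pvK1 ++ r) = pvV1 ++ pvScan r := by
  show pvScan ('\'' :: (['w', 'e', 'b', '_', 's', 'e', 'r', 'v', 'e', 'r', '_', '2', '\''] ++ r)) = _
  rw [pvScan]
  rw [if_pos (by simp [pvK1, List.isPrefixOf])]
  simp

lemma pvScan_k2 (r : List Char) : pvScan (pvK2 ++ r) = pvV1 ++ pvScan r := by
  show pvScan ('\'' :: (['u', 't', 'f', '-', '8', '\''] ++ r)) = _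
  rw [pvScan]
  rw [if_neg (by simp [pvK1, List.isPrefixOf]), if_pos (by simp [pvK2, List.isPrefixOf])]
  simp

lemma pvScan_k3 (r : List Char) : pvScan (pvK3 ++ r) = pvV3 ++ pvScan r := by
  show pvScan ('"' :: (['w', 'e', 'b', '_', 's', 'e', 'r', 'v', 'e', 'r', '_', '2', '"'] ++ r)) = _
  rw [pvScan]
  rw [if_neg (by simp [pvK1, List.isPrefixOf]), if_neg (by simp [pvK2, List.isPrefixOf]),
      if_pos (by simp [pvK3, List.isPrefixOf])]
  simp

lemma pvScan_cons (c : Char) (t : List Char) (h1 : ¬ pvK1.isPrefixOf (c :: t) = true)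
    (h2 : ¬ pvK2.isPrefixOf (c :: t) = true) (h3 : ¬ pvK3.isPrefixOf (c :: t) = true) :
    pvScan (c :: t) = c :: pvScan t := by
  rw [pvScan, if_neg h1, if_neg h2, if_neg h3]

-- the replacement value pvV1 is transparent to the k2- and k3-passes

lemma skipV1_k2 (X : List Char) (h : ¬ pvPat2.isPrefixOf X = true) :
    pvRepl pvK2 pvV1 (pvV1 ++ X) = pvV1 ++ pvRepl pvK2 pvV1 X := by
  apply pvRepl_skip
  intro i hi
  replace hi : i < 9 := by simpa [pvV1] using hi
  interval_cases i <;>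
    simp_all [pvV1, pvK2, pvPat2, List.isPrefixOf]

lemma skipV1_k3 (X : List Char) :
    pvRepl pvK3 pvV3 (pvV1 ++ X) = pvV1 ++ pvRepl pvK3 pvV3 X := by
  apply pvRepl_skip
  intro i hi
  replace hi : i < 9 := by simpa [pvV1] using hi
  interval_cases i <;> simp [pvV1, pvK3, List.isPrefixOf]

-- the k1-pass is transparent to pvK2 (unless the bad overlap occurs) and to pvK3; similarly for k2

lemma skipK2_k1 (X : List Char) (h : ¬ pvPat1.isPrefixOf X = true) :
    pvRepl pvK1 pvV1 (pvK2 ++ X) = pvK2 ++ pvRepl pvK1 pvV1 X := by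
  apply pvRepl_skip
  intro i hi
  replace hi : i < 7 := by simpa [pvK2] using hi
  interval_cases i <;> simp_all [pvK1, pvK2, pvPat1, List.isPrefixOf]

lemma skipK3_k1 (X : List Char) :
    pvRepl pvK1 pvV1 (pvK3 ++ X) = pvK3 ++ pvRepl pvK1 pvV1 X := by
  apply pvRepl_skip
  intro i hi
  replace hi : i < 14 := by simpa [pvK3] using hi
  interval_cases i <;> simp [pvK1, pvK3, List.isPrefixOf]

lemma skipK3_k2 (X : List Char) :
    pvRepl pvK2 pvV1 (pvK3 ++ X) = pvK3 ++ pvRepl pvK2 pvV1 X := by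
  apply pvRepl_skip
  intro i hi
  replace hi : i < 14 := by simpa [pvK3] using hi
  interval_cases i <;> simp [pvK2, pvK3, List.isPrefixOf]

-- prefix preservation through the k1- and k2-passes, specialized

lemma pres_k1_pat2 (X : List Char) (h : ¬ pvPat2.isPrefixOf X = true) :
    ¬ pvPat2.isPrefixOf (pvRepl pvK1 pvV1 X) = true := fun hx =>
  h (pvRepl_pres pvK1 pvV1 '\'' (by simp [pvK1]) (by simp [pvV1]) pvPat2
      (by intro c hc; fin_cases hc <;> simp) X hx)

lemma pvMain : ∀ (n : Nat) (l : List Char), l.length ≤ n →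
    ¬ (pvBad1 <:+: l) → ¬ (pvBad2 <:+: l) →
    pvRepl pvK3 pvV3 (pvRepl pvK2 pvV1 (pvRepl pvK1 pvV1 l)) = pvScan l := by
  intro n
  induction n with
  | zero =>
    intro l h _ _
    have : l = [] := by cases l <;> simp_all
    subst this
    simp [pvRepl, pvScan]
  | succ m ih =>
    intro l hlen hb1 hb2
    match l with
    | [] => simp [pvRepl, pvScan]
    | c :: t =>
      by_cases h1 : pvK1.isPrefixOf (c :: t) = true
      · -- case 1: the "'web_server_2'" key is at the front
        obtain ⟨r, hr⟩ := List.isPrefixOf_iff_prefix.mp h1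
        rw [← hr] at hb1 hb2 hlen ⊢
        have hru : ¬ pvPat2.isPrefixOf r = true := by
          intro hx
          obtain ⟨r2, hr2⟩ := List.isPrefixOf_iff_prefix.mp hx
          exact hb1 ⟨[], r2, by rw [← hr2]; simp [pvBad1, pvK1, pvPat2]⟩
        have hb1' : ¬ (pvBad1 <:+: r) := fun h => hb1 (h.trans (List.suffix_append pvK1 r).isInfix)
        have hb2' : ¬ (pvBad2 <:+: r) := fun h => hb2 (h.trans (List.suffix_append pvK1 r).isInfix)
        have hlen' : r.length ≤ m := by simp [pvK1] at hlen; omega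
        rw [pvRepl_head pvK1 pvV1 (by simp [pvK1]) r]
        rw [skipV1_k2 _ (pres_k1_pat2 r hru)]
        rw [skipV1_k3]
        rw [ih r hlen' hb1' hb2', pvScan_k1]
      · by_cases h2 : pvK2.isPrefixOf (c :: t) = true
        · -- case 2: the "'utf-8'" key is at the front
          obtain ⟨r, hr⟩ := List.isPrefixOf_iff_prefix.mp h2
          rw [← hr] at hb1 hb2 hlen ⊢
          have hrw : ¬ pvPat1.isPrefixOf r = true := by
            intro hx
            obtain ⟨r2, hr2⟩ := List.isPrefixOf_iff_prefix.mp hx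
            exact hb2 ⟨[], r2, by rw [← hr2]; simp [pvBad2, pvK2, pvPat1]⟩
          have hb1' : ¬ (pvBad1 <:+: r) := fun h => hb1 (h.trans (List.suffix_append pvK2 r).isInfix)
          have hb2' : ¬ (pvBad2 <:+: r) := fun h => hb2 (h.trans (List.suffix_append pvK2 r).isInfix)
          have hlen' : r.length ≤ m := by simp [pvK2] at hlen; omega
          rw [skipK2_k1 _ hrw]
          rw [pvRepl_head pvK2 pvV1 (by simp [pvK2]) _]
          rw [skipV1_k3]
          rw [ih r hlen' hb1' hb2', pvScan_k2]
        · by_cases h3 : pvK3.isPrefixOf (c :: t) = true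
          · -- case 3: the '"web_server_2"' key is at the front
            obtain ⟨r, hr⟩ := List.isPrefixOf_iff_prefix.mp h3
            rw [← hr] at hb1 hb2 hlen ⊢
            have hb1' : ¬ (pvBad1 <:+: r) := fun h => hb1 (h.trans (List.suffix_append pvK3 r).isInfix)
            have hb2' : ¬ (pvBad2 <:+: r) := fun h => hb2 (h.trans (List.suffix_append pvK3 r).isInfix)
            have hlen' : r.length ≤ m := by simp [pvK3] at hlen; omega
            rw [skipK3_k1, skipK3_k2]
            rw [pvRepl_head pvK3 pvV3 (by simp [pvK3]) _]
            rw [ih r hlen' hb1' hb2', pvScan_k3]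
          · -- case 4: no key matches at the front; copy one character
            have hb1' : ¬ (pvBad1 <:+: t) := fun h => hb1 (h.trans (List.suffix_cons c t).isInfix)
            have hb2' : ¬ (pvBad2 <:+: t) := fun h => hb2 (h.trans (List.suffix_cons c t).isInfix)
            have hlen' : t.length ≤ m := by simp at hlen; omega
            rw [pvRepl_cons pvK1 pvV1 c t h1]
            have hX2 : ¬ pvK2.isPrefixOf (c :: pvRepl pvK1 pvV1 t) = true := by
              intro hx
              apply h2
              simp only [pvK2, List.isPrefixOf_cons₂] at hx ⊢
              obtain ⟨hc, hrest⟩ := Bool.and_eq_true_iff.mp hx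
              refine Bool.and_eq_true_iff.mpr ⟨hc, ?_⟩
              have := pvRepl_pres pvK1 pvV1 '\'' (by simp [pvK1]) (by simp [pvV1]) pvPat2
                (by intro x hx'; fin_cases hx' <;> simp) t (by simpa [pvPat2] using hrest)
              simpa [pvPat2] using this
            rw [pvRepl_cons pvK2 pvV1 c _ hX2]
            have hX3 : ¬ pvK3.isPrefixOf (c :: pvRepl pvK2 pvV1 (pvRepl pvK1 pvV1 t)) = true := by
              intro hx
              apply h3
              simp only [pvK3, List.isPrefixOf_cons₂] at hx ⊢
              obtain ⟨hc, hrest⟩ := Bool.and_eq_true_iff.mp hx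
              refine Bool.and_eq_true_iff.mpr ⟨hc, ?_⟩
              have s2 := pvRepl_pres pvK2 pvV1 '\'' (by simp [pvK2]) (by simp [pvV1]) pvPat3
                (by intro x hx'; fin_cases hx' <;> simp) (pvRepl pvK1 pvV1 t)
                (by simpa [pvPat3] using hrest)
              have s1 := pvRepl_pres pvK1 pvV1 '\'' (by simp [pvK1]) (by simp [pvV1]) pvPat3
                (by intro x hx'; fin_cases hx' <;> simp) t s2
              simpa [pvPat3] using s1
            rw [pvRepl_cons pvK3 pvV3 c _ hX3]
            rw [ih t hlen' hb1' hb2']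
            rw [pvScan_cons c t h1 h2 h3]

lemma portA_eq (code : String) :
    replace_obfuscated_strings code =
      String.ofList (pvRepl pvK3 pvV3 (pvRepl pvK2 pvV1 (pvRepl pvK1 pvV1 code.toList))) := by
  have hA : replace_obfuscated_strings code
      = PySem.Str.replace (PySem.Str.replace (PySem.Str.replace (PySem.Str.replace code
          "'web_server_2'" "'asyncio'") "'utf-8'" "'asyncio'")
          "\"web_server_2\"" "\"asyncio\"") "\"utf-8\"" "\"utf-8\"" := rfl
  apply String.toList_inj.mp
  rw [hA, String.toList_ofList]
  rw [str_replace_eq _ _ _ (by decide), pvRepl_self _ (by decide)]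
  rw [str_replace_eq _ _ _ (by decide)]
  rw [str_replace_eq _ _ _ (by decide)]
  rw [str_replace_eq _ _ _ (by decide)]
  rfl

-- ===== VERDICT (by name: the statement is the Claim_ definition above) =====
theorem replace_obfuscated_strings_spec : Claim_equal_replace_obfuscated_strings := by
  intro code _ hpre
  show replace_obfuscated_strings code = replace_obfuscated_strings_alt code
  rw [portA_eq, pvMain code.toList.length code.toList le_rfl hpre.1 hpre.2]
  rfl
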